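-- pv_equiv track=rewrite | github.com/jfnavarro/st_pipeline | pipeline/stpipeline/common/clustering.py | extractMolecularBarcodes
-- ===== SOURCE A (Python) =====
-- from collections import defaultdict
--
-- def extractMolecularBarcodes(reads, mc_start_position, mc_end_position):
--     """
--     :param reads a list of tuples (read_name, sequence, quality)
--     :param mc_start_position the start position of the molecular barcodes in the reads
--     :param mc_end_position the end position of the molecular barcodes in the reads
--     Extracts a list of molecular barcodes from the list of reads given their
--     start and end positions and returns a list of
--     (molecular_barcode, (read_name, sequence, quality), ocurrences, number Ns)
--     sorted by molecular_barcode, ocurrences(reverse) and number of Ns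
--     """
--     assert(mc_end_position > mc_start_position and mc_start_position >= 0)
--     # Create a list with the molecular barcodes and a hash with the occurrences
--     molecular_barcodes = list()
--     molecular_barcodes_counts = defaultdict(int)
--     for read in reads:
--         if mc_end_position > len(read[1]):
--             raise ValueError("UMI could not be found in the read " + read + "\n")
--         mc = read[1][mc_start_position:mc_end_position]
--         molecular_barcodes.append((mc, read))
--         molecular_barcodes_counts[mc] += 1
--
--     # Creates a new list with the molecular barcodes, occurences and N content
--     molecular_barcodes_count_list = list()
--     for mc in molecular_barcodes:
--         count = molecular_barcodes_counts[mc[0]]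
--         count_n = mc[0].count("N")
--         molecular_barcodes_count_list.append((mc[0],mc[1],count,count_n))
--
--     # Return the list sorted by molecular barcode, occurrence(reverse) and number of Ns
--     return sorted(molecular_barcodes_count_list, key=lambda x: (x[0], -x[2], x[3]))
-- ===== SOURCE B (Python) =====
-- def extractMolecularBarcodes(reads, mc_start_position, mc_end_position):
--     assert(mc_end_position > mc_start_position and mc_start_position >= 0)
--     # Group the reads by molecular barcode (insertion order kept inside a group)
--     groups = {}
--     for read in reads:
--         if mc_end_position > len(read[1]):
--             raise ValueError("UMI could not be found in the read " + read + "\n")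
--         mc = read[1][mc_start_position:mc_end_position]
--         groups.setdefault(mc, []).append(read)
--     # Emit the groups in sorted-barcode order; occurrences and N-content are
--     # constant per barcode, so sorting the (few) distinct barcodes suffices
--     result = []
--     for mc in sorted(groups):
--         group = groups[mc]
--         count = len(group)
--         count_n = mc.count("N")
--         for read in group:
--             result.append((mc, read, count, count_n))
--     return result
-- ===== Notes on version B (the rewrite author's own statement) =====
-- stated objective: alternative
-- what changed: Instead of building a flat list plus a counter and stable-sorting it with a (barcode, -count, Ns) tri-key, B groups reads into a dict keyed by barcode and emits the groups in sorted-barcode order (count = group size, Ns counted once per barcode); the tri-key sort of n records is replaced by a sort of the k distinct barcodes.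
import Mathlib
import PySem

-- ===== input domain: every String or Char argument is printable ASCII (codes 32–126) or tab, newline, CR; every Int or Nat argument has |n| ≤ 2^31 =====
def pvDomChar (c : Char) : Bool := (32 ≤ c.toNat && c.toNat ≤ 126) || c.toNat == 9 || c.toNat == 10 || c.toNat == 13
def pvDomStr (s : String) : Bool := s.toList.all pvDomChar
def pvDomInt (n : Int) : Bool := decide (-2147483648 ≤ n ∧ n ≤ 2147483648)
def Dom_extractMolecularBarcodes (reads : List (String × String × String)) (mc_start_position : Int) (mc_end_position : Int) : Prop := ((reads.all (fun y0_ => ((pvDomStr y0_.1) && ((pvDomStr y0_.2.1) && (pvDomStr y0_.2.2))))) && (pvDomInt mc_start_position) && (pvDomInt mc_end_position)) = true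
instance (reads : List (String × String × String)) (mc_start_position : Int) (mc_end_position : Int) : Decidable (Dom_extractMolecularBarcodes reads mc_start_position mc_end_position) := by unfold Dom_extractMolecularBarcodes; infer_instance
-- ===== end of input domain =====

-- B groups reads by molecular barcode in a dict and emits the groups in sorted-barcode
-- order instead of stable-sorting a flat list with a (barcode, -count, Ns) tri-key;
-- equivalence of the RETURN values is proved on Pre_ (where the Python A returns).

-- ===== PORT A =====
def extractMolecularBarcodes (reads : List (String × String × String)) (mc_start_position : Int) (mc_end_position : Int) : List (String × (String × String × String) × Int × Int) :=
  -- first loop: build the flat (mc, read) list and the occurrence counter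
  let st := reads.foldl
    (fun (acc : List (String × (String × String × String)) × PySem.Dict String Int) read =>
      let mc := PySem.Str.slice read.2.1 (some mc_start_position) (some mc_end_position)
      (acc.1 ++ [(mc, read)], acc.2.modify mc 0 (· + 1)))
    ([], PySem.Dict.empty)
  -- second loop: attach count and N-content to every entry
  let lst := st.1.foldl
    (fun acc mcp => acc ++ [(mcp.1, mcp.2, st.2.getD mcp.1 0, (PySem.Str.count mcp.1 "N" : Int))])
    []
  -- sorted(..., key=lambda x: (x[0], -x[2], x[3]))  (Python tuple order = lexicographic)
  PySem.List.sorted lst (fun x => toLex (x.1, toLex (-x.2.2.1, x.2.2.2))) false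

-- ===== PORT B =====
def extractMolecularBarcodes_alt (reads : List (String × String × String)) (mc_start_position : Int) (mc_end_position : Int) : List (String × (String × String × String) × Int × Int) :=
  -- grouping loop: groups.setdefault(mc, []).append(read)
  let groups := reads.foldl
    (fun (d : PySem.Dict String (List (String × String × String))) read =>
      d.modify (PySem.Str.slice read.2.1 (some mc_start_position) (some mc_end_position)) [] (· ++ [read]))
    PySem.Dict.empty
  -- emission loop: for mc in sorted(groups): for read in groups[mc]: append
  (PySem.List.sorted groups.keys (fun k => k) false).foldl
    (fun acc mc =>
      let group := groups.getD mc []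
      let count : Int := PySem.List.len group
      let count_n : Int := (PySem.Str.count mc "N" : Int)
      group.foldl (fun acc2 read => acc2 ++ [(mc, read, count, count_n)]) acc)
    []

-- ===== PRECONDITION & SPEC =====
-- Pre_ excludes exactly where the Python A raises: the assert (mc_end > mc_start ≥ 0)
-- and the ValueError path for a read whose sequence is shorter than mc_end.
def Pre_extractMolecularBarcodes (reads : List (String × String × String)) (mc_start_position : Int) (mc_end_position : Int) : Prop :=
  0 ≤ mc_start_position ∧ mc_start_position < mc_end_position ∧
    ∀ r ∈ reads, mc_end_position ≤ (r.2.1.toList.length : Int)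
instance (reads : List (String × String × String)) (mc_start_position : Int) (mc_end_position : Int) : Decidable (Pre_extractMolecularBarcodes reads mc_start_position mc_end_position) := by unfold Pre_extractMolecularBarcodes; infer_instance

def pvWitness_extractMolecularBarcodes : (List (String × String × String)) × Int × Int :=
  ([("r1", "ACGT", "IIII"), ("r2", "ACGG", "IIII")], 0, 2)

def Spec_extractMolecularBarcodes (reads : List (String × String × String)) (mc_start_position : Int) (mc_end_position : Int) (out : List (String × (String × String × String) × Int × Int)) : Prop := out = extractMolecularBarcodes_alt reads mc_start_position mc_end_position
instance (reads : List (String × String × String)) (mc_start_position : Int) (mc_end_position : Int) (out : List (String × (String × String × String) × Int × Int)) : Decidable (Spec_extractMolecularBarcodes reads mc_start_position mc_end_position out) := by unfold Spec_extractMolecularBarcodes; infer_instance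

-- ===== CLAIM (what is proved, stated in full; the proofs are below) =====
def Claim_equal_extractMolecularBarcodes : Prop := ∀ (reads : List (String × String × String)) (mc_start_position : Int) (mc_end_position : Int), Dom_extractMolecularBarcodes reads mc_start_position mc_end_position → Pre_extractMolecularBarcodes reads mc_start_position mc_end_position → Spec_extractMolecularBarcodes reads mc_start_position mc_end_position (extractMolecularBarcodes reads mc_start_position mc_end_position)

-- ===== LEMMAS AND PROOFS =====

theorem extractMolecularBarcodes_witness_ok :
    Dom_extractMolecularBarcodes pvWitness_extractMolecularBarcodes.1 pvWitness_extractMolecularBarcodes.2.1 pvWitness_extractMolecularBarcodes.2.2 ∧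
    Pre_extractMolecularBarcodes pvWitness_extractMolecularBarcodes.1 pvWitness_extractMolecularBarcodes.2.1 pvWitness_extractMolecularBarcodes.2.2 := by
  decide


-- generic machinery: stable insertion sort of a list equals its groups emitted in
-- sorted-distinct-key order ------------------------------------------------------

-- ordered insert of a key into a strictly increasing list of distinct keys
def pvInsKey {k : Type} [LinearOrder k] (x : k) : List k -> List k
  | [] => [x]
  | h :: t => if x < h then x :: h :: t else if x = h then h :: t else h :: pvInsKey x t

-- the groups of p, concatenated in the order the keys appear in ks
def pvGrp {a k : Type} [DecidableEq k] (key : a -> k) (ks : List k) (p : List a) : List a :=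
  ks.flatMap (fun c => p.filter (fun x => decide (key x = c)))

-- the distinct keys of p, accumulated in increasing order
def pvDKeys {a k : Type} [LinearOrder k] (key : a -> k) (p : List a) : List k :=
  p.foldl (fun ks x => pvInsKey (key x) ks) []

theorem mem_pvInsKey {k : Type} [LinearOrder k] (x y : k) (ks : List k) :
    y ∈ pvInsKey x ks ↔ y = x ∨ y ∈ ks := by
  induction ks with
  | nil => simp [pvInsKey]
  | cons h t ih =>
    simp only [pvInsKey]
    split_ifs with h1 h2
    · simp
    · subst h2; simp only [List.mem_cons]; tauto
    · simp only [List.mem_cons, ih]; tauto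

theorem pairwise_pvInsKey {k : Type} [LinearOrder k] (x : k) (ks : List k)
    (hp : ks.Pairwise (· < ·)) : (pvInsKey x ks).Pairwise (· < ·) := by
  induction ks with
  | nil => simp [pvInsKey]
  | cons h t ih =>
    rcases List.pairwise_cons.1 hp with ⟨hh, ht⟩
    simp only [pvInsKey]
    split_ifs with h1 h2
    · refine List.pairwise_cons.2 ⟨?_, hp⟩
      intro y hy
      rcases List.mem_cons.1 hy with rfl | hy
      · exact h1
      · exact lt_trans h1 (hh y hy)
    · exact hp
    · refine List.pairwise_cons.2 ⟨?_, ih ht⟩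
      intro y hy
      rcases (mem_pvInsKey x y t).1 hy with rfl | hy
      · exact lt_of_le_of_ne (not_lt.1 h1) (Ne.symm h2)
      · exact hh y hy

theorem key_mem_of_mem_pvGrp {a k : Type} [DecidableEq k] (key : a -> k) (ks : List k)
    (p : List a) (x : a) (hx : x ∈ pvGrp key ks p) : key x ∈ ks := by
  simp only [pvGrp, List.mem_flatMap, List.mem_filter, decide_eq_true_eq] at hx
  rcases hx with ⟨c, hc, _, rfl⟩
  exact hc

theorem pvGrp_append_single_of_notmem {a k : Type} [DecidableEq k] (key : a -> k)
    (ks : List k) (p : List a) (x : a) (h : key x ∉ ks) :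
    pvGrp key ks (p ++ [x]) = pvGrp key ks p := by
  induction ks with
  | nil => rfl
  | cons c t ih =>
    simp only [List.mem_cons, not_or] at h
    simp only [pvGrp, List.flatMap_cons, List.filter_append] at *
    rw [ih h.2]
    have : List.filter (fun y => decide (key y = c)) [x] = [] := by
      simp [List.filter, h.1]
    simp [this]

theorem insertBy_prefix_skip {a : Type} (before : a -> a -> Bool) (x : a) (l r : List a)
    (h : ∀ y ∈ l, before x y = false) :
    PySem.List.insertBy before x (l ++ r) = l ++ PySem.List.insertBy before x r := by
  induction l with
  | nil => rfl
  | cons y t ih =>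
    have hy : before x y = false := h y (List.mem_cons_self ..)
    have : PySem.List.insertBy before x (y :: (t ++ r))
        = if before x y then x :: y :: (t ++ r) else y :: PySem.List.insertBy before x (t ++ r) := rfl
    simp only [List.cons_append, this, hy, Bool.false_eq_true, if_false]
    rw [ih (fun z hz => h z (List.mem_cons_of_mem _ hz))]

theorem insertBy_front {a : Type} (before : a -> a -> Bool) (x : a) (l : List a)
    (h : ∀ y ∈ l, before x y = true) :
    PySem.List.insertBy before x l = x :: l := by
  cases l with
  | nil => rfl
  | cons y t =>
    have hy : before x y = true := h y (List.mem_cons_self ..)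
    show (if before x y then x :: y :: t else y :: PySem.List.insertBy before x t) = x :: y :: t
    simp [hy]

theorem pvIns_grp {a k : Type} [LinearOrder k] (key : a -> k) (x : a) :
    ∀ (ks : List k) (p : List a), ks.Pairwise (· < ·) →
      (key x ∉ ks → p.filter (fun y => decide (key y = key x)) = []) →
      PySem.List.insertBy (fun u v => decide (key u < key v)) x (pvGrp key ks p)
        = pvGrp key (pvInsKey (key x) ks) (p ++ [x]) := by
  intro ks
  induction ks with
  | nil =>
    intro p _ H
    have hf : p.filter (fun y => decide (key y = key x)) = [] := H (by simp)
    show PySem.List.insertBy _ x [] = pvGrp key [key x] (p ++ [x])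
    simp [pvGrp, PySem.List.insertBy, List.filter_append, hf, List.filter]
  | cons c t ih =>
    intro p hp H
    rcases List.pairwise_cons.1 hp with ⟨hc, ht⟩
    have hgrp : pvGrp key (c :: t) p
        = p.filter (fun y => decide (key y = c)) ++ pvGrp key t p := by
      simp [pvGrp]
    rcases lt_trichotomy (key x) c with hlt | heq | hgt
    · -- new smallest key: x goes in front of everything
      have hnot : key x ∉ c :: t := by
        simp only [List.mem_cons, not_or]
        exact ⟨ne_of_lt hlt, fun hmem => absurd (lt_trans hlt (hc _ hmem)) (lt_irrefl _)⟩
      have hfront : PySem.List.insertBy (fun u v => decide (key u < key v)) x (pvGrp key (c :: t) p)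
          = x :: pvGrp key (c :: t) p := by
        apply insertBy_front
        intro y hy
        have hk := key_mem_of_mem_pvGrp key (c :: t) p y hy
        rcases List.mem_cons.1 hk with hkc | hkt
        · simp [hkc, hlt]
        · simp [lt_trans hlt (hc _ hkt)]
      have hins : pvInsKey (key x) (c :: t) = key x :: c :: t := by
        simp [pvInsKey, hlt]
      have hfp : p.filter (fun y => decide (key y = key x)) = [] := H hnot
      rw [hfront, hins]
      show x :: pvGrp key (c :: t) p
          = (p ++ [x]).filter (fun y => decide (key y = key x)) ++ pvGrp key (c :: t) (p ++ [x])
      rw [pvGrp_append_single_of_notmem key (c :: t) p x hnot, List.filter_append, hfp]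
      simp [List.filter]
    · -- existing key: x goes at the end of its group
      have hnt : key x ∉ t := by
        intro hmem; exact absurd (heq ▸ hc _ hmem) (lt_irrefl _)
      have hskip : PySem.List.insertBy (fun u v => decide (key u < key v)) x (pvGrp key (c :: t) p)
          = p.filter (fun y => decide (key y = c)) ++ PySem.List.insertBy (fun u v => decide (key u < key v)) x (pvGrp key t p) := by
        rw [hgrp]
        apply insertBy_prefix_skip
        intro y hy
        have : key y = c := by simpa using (List.mem_filter.1 hy).2
        simp [this, heq]
      have hfront : PySem.List.insertBy (fun u v => decide (key u < key v)) x (pvGrp key t p)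
          = x :: pvGrp key t p := by
        apply insertBy_front
        intro y hy
        have hk := key_mem_of_mem_pvGrp key t p y hy
        simp [heq ▸ hc _ hk]
      have hins : pvInsKey (key x) (c :: t) = c :: t := by
        simp [pvInsKey, heq]
      rw [hskip, hfront, hins]
      show p.filter (fun y => decide (key y = c)) ++ x :: pvGrp key t p
          = (p ++ [x]).filter (fun y => decide (key y = c)) ++ pvGrp key t (p ++ [x])
      rw [pvGrp_append_single_of_notmem key t p x hnt, List.filter_append]
      have : List.filter (fun y => decide (key y = c)) [x] = [x] := by
        simp [List.filter, heq]
      simp [this]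
    · -- key x larger: skip the c-group and recurse
      have hskip : PySem.List.insertBy (fun u v => decide (key u < key v)) x (pvGrp key (c :: t) p)
          = p.filter (fun y => decide (key y = c)) ++ PySem.List.insertBy (fun u v => decide (key u < key v)) x (pvGrp key t p) := by
        rw [hgrp]
        apply insertBy_prefix_skip
        intro y hy
        have : key y = c := by simpa using (List.mem_filter.1 hy).2
        simp [this, not_lt.2 (le_of_lt hgt)]
      have H' : key x ∉ t → p.filter (fun y => decide (key y = key x)) = [] := by
        intro hnt
        exact H (by simp only [List.mem_cons, not_or]; exact ⟨Ne.symm (ne_of_lt hgt), hnt⟩)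
      have hins : pvInsKey (key x) (c :: t) = c :: pvInsKey (key x) t := by
        simp [pvInsKey, not_lt.2 (le_of_lt hgt), Ne.symm (ne_of_lt hgt)]
      rw [hskip, ih p ht H', hins]
      show p.filter (fun y => decide (key y = c)) ++ pvGrp key (pvInsKey (key x) t) (p ++ [x])
          = (p ++ [x]).filter (fun y => decide (key y = c)) ++ pvGrp key (pvInsKey (key x) t) (p ++ [x])
      rw [List.filter_append]
      have : List.filter (fun y => decide (key y = c)) [x] = [] := by
        simp [List.filter, Ne.symm (ne_of_lt hgt)]
      simp [this]

theorem pvDKeys_append_single {a k : Type} [LinearOrder k] (key : a -> k) (p : List a) (x : a) :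
    pvDKeys key (p ++ [x]) = pvInsKey (key x) (pvDKeys key p) := by
  simp [pvDKeys, List.foldl_append]

theorem pairwise_pvDKeys {a k : Type} [LinearOrder k] (key : a -> k) (p : List a) :
    (pvDKeys key p).Pairwise (· < ·) := by
  induction p using List.reverseRecOn with
  | nil => simp [pvDKeys]
  | append_singleton p x ih => rw [pvDKeys_append_single]; exact pairwise_pvInsKey _ _ ih

theorem mem_pvDKeys {a k : Type} [LinearOrder k] (key : a -> k) (p : List a) (c : k) :
    c ∈ pvDKeys key p ↔ c ∈ p.map key := by
  induction p using List.reverseRecOn with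
  | nil => simp [pvDKeys]
  | append_singleton p x ih =>
    rw [pvDKeys_append_single]
    simp [mem_pvInsKey, ih, or_comm]

-- a stable sort is its groups emitted in increasing-distinct-key order
theorem sorted_eq_pvGrp {a k : Type} [LinearOrder k] (key : a -> k) (p : List a) :
    PySem.List.sorted p key = pvGrp key (pvDKeys key p) p := by
  rw [PySem.List.sorted_eq_foldl_insertBy]
  induction p using List.reverseRecOn with
  | nil => rfl
  | append_singleton p x ih =>
    rw [List.foldl_append, List.foldl_cons, List.foldl_nil, ih,
      pvIns_grp key x (pvDKeys key p) p (pairwise_pvDKeys key p), pvDKeys_append_single]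
    intro hnot
    rw [List.filter_eq_nil_iff]
    intro y hy hkey
    exact hnot ((mem_pvDKeys key p (key x)).2 (by
      simp only [decide_eq_true_eq] at hkey
      exact hkey ▸ List.mem_map_of_mem hy))

-- insertion sort only looks at comparisons: two keys that order the elements of xs
-- the same way give the same sorted list
theorem insertBy_congr_on {a : Type} (b1 b2 : a -> a -> Bool) (x : a) (l : List a)
    (h : ∀ y ∈ l, b1 x y = b2 x y) :
    PySem.List.insertBy b1 x l = PySem.List.insertBy b2 x l := by
  induction l with
  | nil => rfl
  | cons y t ih =>
    show (if b1 x y then x :: y :: t else y :: PySem.List.insertBy b1 x t)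
        = (if b2 x y then x :: y :: t else y :: PySem.List.insertBy b2 x t)
    rw [h y (List.mem_cons_self ..), ih (fun z hz => h z (List.mem_cons_of_mem _ hz))]

theorem foldl_insertBy_congr_on {a : Type} (S : List a) (b1 b2 : a -> a -> Bool)
    (h : ∀ u ∈ S, ∀ v ∈ S, b1 u v = b2 u v) :
    ∀ (l acc : List a), (∀ y ∈ l, y ∈ S) → (∀ y ∈ acc, y ∈ S) →
      List.foldl (fun acc x => PySem.List.insertBy b1 x acc) acc l
        = List.foldl (fun acc x => PySem.List.insertBy b2 x acc) acc l := by
  intro l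
  induction l with
  | nil => intro acc _ _; rfl
  | cons x t ih =>
    intro acc hl hacc
    have hx : x ∈ S := hl x (List.mem_cons_self ..)
    simp only [List.foldl_cons]
    rw [insertBy_congr_on b1 b2 x acc (fun y hy => h x hx y (hacc y hy))]
    exact ih _ (fun y hy => hl y (List.mem_cons_of_mem _ hy))
      (fun y hy => by
        rcases (PySem.List.mem_insertBy ..).1 hy with rfl | hy
        · exact hx
        · exact hacc y hy)

theorem sorted_congr_on {a k1 k2 : Type} [LinearOrder k1] [LinearOrder k2]
    (f1 : a -> k1) (f2 : a -> k2) (xs : List a)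
    (h : ∀ u ∈ xs, ∀ v ∈ xs, (f1 u < f1 v ↔ f2 u < f2 v)) :
    PySem.List.sorted xs f1 = PySem.List.sorted xs f2 := by
  rw [PySem.List.sorted_eq_foldl_insertBy, PySem.List.sorted_eq_foldl_insertBy]
  exact foldl_insertBy_congr_on xs _ _
    (fun u hu v hv => by simp only [decide_eq_decide]; exact h u hu v hv)
    xs [] (fun y hy => hy) (by simp)

-- shared abbreviations for the two ports (proof-only) ----------------------------

def pvMc (s e : Int) (r : String × String × String) : String :=
  PySem.Str.slice r.2.1 (some s) (some e)

def pvCounts (reads : List (String × String × String)) (s e : Int) : PySem.Dict String Int :=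
  reads.foldl (fun d r => d.modify (pvMc s e r) 0 (· + 1)) PySem.Dict.empty

def pvBuild (reads : List (String × String × String)) (s e : Int)
    (r : String × String × String) : String × (String × String × String) × Int × Int :=
  (pvMc s e r, r, (pvCounts reads s e).getD (pvMc s e r) 0, (PySem.Str.count (pvMc s e r) "N" : Int))

def pvL (reads : List (String × String × String)) (s e : Int) :
    List (String × (String × String × String) × Int × Int) :=
  reads.map (pvBuild reads s e)

theorem pvCounts_getD (reads : List (String × String × String)) (s e : Int) (m : String) :
    (pvCounts reads s e).getD m 0 = ((reads.map (pvMc s e)).count m : Int) := by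
  have h : pvCounts reads s e
      = (reads.map (pvMc s e)).foldl (fun d x => d.modify x 0 (· + 1)) PySem.Dict.empty := by
    rw [List.foldl_map]; rfl
  rw [h, PySem.Dict.getD_foldl_modify_add_one]
  simp

-- the first two loops of A produce exactly pvL
theorem A_fold1 (s e : Int) :
    ∀ (reads : List (String × String × String))
      (acc : List (String × (String × String × String))) (d : PySem.Dict String Int),
      reads.foldl
        (fun (st : List (String × (String × String × String)) × PySem.Dict String Int) read =>
          (st.1 ++ [(pvMc s e read, read)], st.2.modify (pvMc s e read) 0 (· + 1)))
        (acc, d)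
      = (acc ++ reads.map (fun r => (pvMc s e r, r)),
         reads.foldl (fun d r => d.modify (pvMc s e r) 0 (· + 1)) d) := by
  intro reads
  induction reads with
  | nil => intro acc d; simp
  | cons r t ih => intro acc d; simp [ih]

theorem A_eq_sorted_pvL (reads : List (String × String × String)) (s e : Int) :
    extractMolecularBarcodes reads s e
      = PySem.List.sorted (pvL reads s e)
          (fun x => toLex (x.1, toLex (-x.2.2.1, x.2.2.2))) := by
  have hst := A_fold1 s e reads [] PySem.Dict.empty
  show PySem.List.sorted
      ((reads.foldl
          (fun (st : List (String × (String × String × String)) × PySem.Dict String Int) read =>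
            (st.1 ++ [(pvMc s e read, read)], st.2.modify (pvMc s e read) 0 (· + 1)))
          ([], PySem.Dict.empty)).1.foldl
        (fun acc mcp => acc ++ [(mcp.1, mcp.2,
          (reads.foldl
            (fun (st : List (String × (String × String × String)) × PySem.Dict String Int) read =>
              (st.1 ++ [(pvMc s e read, read)], st.2.modify (pvMc s e read) 0 (· + 1)))
            ([], PySem.Dict.empty)).2.getD mcp.1 0,
          (PySem.Str.count mcp.1 "N" : Int))])
        [])
      (fun x => toLex (x.1, toLex (-x.2.2.1, x.2.2.2)))
    = _
  rw [hst]
  simp only [PySem.List.foldl_append_singleton_eq_map, List.nil_append, List.map_map]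
  rfl

-- the shape of B after unfolding its two loops
theorem B_eq_flatMap (reads : List (String × String × String)) (s e : Int) :
    extractMolecularBarcodes_alt reads s e
      = (PySem.List.sorted
            (reads.foldl (fun d r => d.modify (pvMc s e r) [] (· ++ [r])) PySem.Dict.empty).keys
            (fun c => c)).flatMap
          (fun m =>
            ((reads.foldl (fun d r => d.modify (pvMc s e r) [] (· ++ [r])) PySem.Dict.empty).getD m []).map
              (fun r => (m, r,
                PySem.List.len ((reads.foldl (fun d r => d.modify (pvMc s e r) [] (· ++ [r])) PySem.Dict.empty).getD m []),
                (PySem.Str.count m "N" : Int)))) := by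
  show (PySem.List.sorted
        (reads.foldl (fun d r => d.modify (pvMc s e r) [] (· ++ [r])) PySem.Dict.empty).keys
        (fun c => c)).foldl
      (fun acc m =>
        ((reads.foldl (fun d r => d.modify (pvMc s e r) [] (· ++ [r])) PySem.Dict.empty).getD m []).foldl
          (fun acc2 read => acc2 ++ [(m, read,
            PySem.List.len ((reads.foldl (fun d r => d.modify (pvMc s e r) [] (· ++ [r])) PySem.Dict.empty).getD m []),
            (PySem.Str.count m "N" : Int))]) acc)
      []
    = _
  have hfun : (fun (acc : List (String × (String × String × String) × Int × Int)) m =>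
        ((reads.foldl (fun d r => d.modify (pvMc s e r) [] (· ++ [r])) PySem.Dict.empty).getD m []).foldl
          (fun acc2 read => acc2 ++ [(m, read,
            PySem.List.len ((reads.foldl (fun d r => d.modify (pvMc s e r) [] (· ++ [r])) PySem.Dict.empty).getD m []),
            (PySem.Str.count m "N" : Int))]) acc)
      = (fun acc m => acc ++
          ((reads.foldl (fun d r => d.modify (pvMc s e r) [] (· ++ [r])) PySem.Dict.empty).getD m []).map
            (fun r => (m, r,
              PySem.List.len ((reads.foldl (fun d r => d.modify (pvMc s e r) [] (· ++ [r])) PySem.Dict.empty).getD m []),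
              (PySem.Str.count m "N" : Int)))) := by
    funext acc m
    exact PySem.List.foldl_append_singleton_eq_map _ _ _
  rw [hfun, PySem.List.foldl_append_eq_flatMap, List.nil_append]

-- B's group dict: lookups and keys
theorem B_groups_getD (reads : List (String × String × String)) (s e : Int) (m : String) :
    (reads.foldl (fun d r => d.modify (pvMc s e r) [] (· ++ [r])) PySem.Dict.empty).getD m []
      = reads.filter (fun r => pvMc s e r == m) := by
  have h : reads.foldl (fun d r => d.modify (pvMc s e r) [] (· ++ [r])) PySem.Dict.empty
      = (reads.map (fun r => (pvMc s e r, r))).foldl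
          (fun d p => d.modify p.1 [] (· ++ [p.2])) PySem.Dict.empty := by
    rw [List.foldl_map]
  rw [h, PySem.Dict.getD_foldl_modify_append]
  simp [List.filter_map, Function.comp_def]

theorem B_groups_keys (reads : List (String × String × String)) (s e : Int) :
    (reads.foldl (fun d r => d.modify (pvMc s e r) [] (· ++ [r])) PySem.Dict.empty).keys
      = PySem.Set.ofList (reads.map (pvMc s e)) := by
  have h := PySem.Dict.keys_foldl_modify_key reads (pvMc s e) ([] : List (String × String × String))
    (fun _ r => (· ++ [r])) PySem.Dict.empty
  rw [h]
  rw [PySem.Dict.keys_empty, PySem.Set.update_eq_append_filter]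
  simp [PySem.Set.contains]

-- the sorted distinct barcodes coincide with pvDKeys of the flat list
theorem B_keys_eq_pvDKeys (reads : List (String × String × String)) (s e : Int) :
    PySem.List.sorted (PySem.Set.ofList (reads.map (pvMc s e))) (fun c => c)
      = pvDKeys (fun x => x.1) (pvL reads s e) := by
  apply PySem.List.sorted_eq_of_perm_of_pairwise_lt
  · rw [List.perm_ext_iff_of_nodup ((pairwise_pvDKeys _ _).imp ne_of_lt) (PySem.Set.nodup_ofList _)]
    intro c
    rw [mem_pvDKeys, PySem.Set.mem_ofList]
    show c ∈ (pvL reads s e).map (fun x => x.1) ↔ _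
    simp only [pvL, List.map_map]
    rfl
  · exact pairwise_pvDKeys _ _

theorem pvL_count (reads : List (String × String × String)) (s e : Int) (m : String) :
    ((reads.filter (fun r => pvMc s e r == m)).length : Int)
      = ((reads.map (pvMc s e)).count m : Int) := by
  congr 1
  rw [← List.countP_eq_length_filter, List.count_eq_countP, List.countP_map]
  rfl

-- per-barcode: A's group of the flat list is B's emitted group
theorem group_eq (reads : List (String × String × String)) (s e : Int) (m : String) :
    (pvL reads s e).filter (fun x => decide (x.1 = m))
      = (reads.filter (fun r => pvMc s e r == m)).map
          (fun r => (m, r, PySem.List.len (reads.filter (fun r => pvMc s e r == m)),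
            (PySem.Str.count m "N" : Int))) := by
  rw [pvL, List.filter_map]
  have hf : ((fun x : String × (String × String × String) × Int × Int => decide (x.1 = m)) ∘ pvBuild reads s e)
      = (fun r => pvMc s e r == m) := by
    funext r
    simp only [Function.comp_apply, pvBuild]
    by_cases h : pvMc s e r = m <;> simp [h]
  rw [hf]
  apply List.map_congr_left
  intro r hr
  have hm : pvMc s e r = m := by simpa [beq_iff_eq] using (List.mem_filter.1 hr).2
  simp only [pvBuild, hm]
  refine congrArg _ (congrArg _ (congrArg (fun z => (z, _)) ?_))
  rw [pvCounts_getD, PySem.List.len, pvL_count]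

-- A's tri-key orders pvL exactly as the barcode alone does
theorem key_congr (reads : List (String × String × String)) (s e : Int) :
    ∀ u ∈ pvL reads s e, ∀ v ∈ pvL reads s e,
      ((fun x : String × (String × String × String) × Int × Int =>
          toLex (x.1, toLex (-x.2.2.1, x.2.2.2))) u
        < (fun x => toLex (x.1, toLex (-x.2.2.1, x.2.2.2))) v
      ↔ u.1 < v.1) := by
  intro u hu v hv
  rcases List.mem_map.1 hu with ⟨ru, _, rfl⟩
  rcases List.mem_map.1 hv with ⟨rv, _, rfl⟩
  rw [Prod.Lex.lt_iff]
  constructor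
  · rintro (h | ⟨heq, hlt⟩)
    · exact h
    · exfalso
      simp only [ofLex_toLex, pvBuild] at heq hlt
      rw [heq] at hlt
      exact lt_irrefl _ hlt
  · intro h; exact Or.inl h

-- ===== VERDICT (by name: the statement is the Claim_ definition above) =====
theorem extractMolecularBarcodes_spec : Claim_equal_extractMolecularBarcodes := by
  intro reads s e _ _
  unfold Spec_extractMolecularBarcodes
  rw [A_eq_sorted_pvL, B_eq_flatMap,
    sorted_congr_on _ (fun x => x.1) _ (key_congr reads s e),
    sorted_eq_pvGrp, pvGrp]
  rw [B_groups_keys, B_keys_eq_pvDKeys]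
  congr 1
  funext m
  rw [B_groups_getD, group_eq]
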